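-- pv_equiv track=rewrite | github.com/NekoRabi/Majsoul-QQBot | plugin/paili_analysis/utils.py | compose_gen_sz
-- ===== SOURCE A (Python) =====
-- def compose_gen_sz(sz) -> list:
--     mycompose = []
--
--     def myrecursion(fr=None, br=None):
--         if fr is not None and br is not None:
--             mycompose.append([sz - fr, br, fr - br])
--             return
--         else:
--             for k in range(0, fr + 1):
--                 myrecursion(fr, k)
--
--     for x in range(sz + 1):
--         fr = sz - x
--         myrecursion(x)
--     return mycompose
-- ===== SOURCE B (Python) =====
-- def compose_gen_sz(sz) -> list:
--     # Successor enumeration: start at the first composition [sz, 0, 0] and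
--     # repeatedly advance to the next composition of sz into 3 parts until the
--     # last one [0, sz, 0]; no nested range loops.
--     if sz < 0:
--         return []
--     out = []
--     a, b, c = sz, 0, 0
--     while True:
--         out.append([a, b, c])
--         if c > 0:
--             b, c = b + 1, c - 1
--         elif a > 0:
--             a, b, c = a - 1, 0, b + c + 1
--         else:
--             return out
-- ===== Notes on version B (the rewrite author's own statement) =====
-- stated objective: alternative
-- what changed: Replaces A's nested range loops with recursive dispatch by a successor-state enumeration: a single while loop that starts at the first composition and repeatedly computes the next composition of sz into three nonnegative parts from the current triple alone, with no inner range loop.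
import Mathlib
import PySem

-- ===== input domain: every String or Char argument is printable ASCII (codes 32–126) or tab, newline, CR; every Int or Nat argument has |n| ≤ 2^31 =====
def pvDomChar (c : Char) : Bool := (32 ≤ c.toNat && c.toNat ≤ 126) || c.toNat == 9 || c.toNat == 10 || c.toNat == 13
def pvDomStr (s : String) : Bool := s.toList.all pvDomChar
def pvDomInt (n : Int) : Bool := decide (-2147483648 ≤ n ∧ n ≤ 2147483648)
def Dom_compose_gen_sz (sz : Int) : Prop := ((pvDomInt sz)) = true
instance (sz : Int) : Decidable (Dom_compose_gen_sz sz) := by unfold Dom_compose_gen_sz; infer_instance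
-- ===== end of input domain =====

-- B replaces A's nested range loops / recursive dispatch with a successor-state enumeration:
-- one loop stepping from each composition of sz into 3 nonnegative parts to the next (alternative).

-- ===== PORT A =====
-- myrecursion(fr, br) with both arguments given: append one triple
def pvMyrecursionBoth (sz fr br : Int) (mycompose : List (List Int)) : List (List Int) :=
  mycompose ++ [[sz - fr, br, fr - br]]

-- myrecursion(fr) with br=None: loop k in range(0, fr+1) calling myrecursion(fr, k)
def pvMyrecursionFr (sz fr : Int) (mycompose : List (List Int)) : List (List Int) :=
  (PySem.List.pyRange 0 (fr + 1) 1).foldl (fun acc k => pvMyrecursionBoth sz fr k acc) mycompose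

def compose_gen_sz (sz : Int) : List (List Int) :=
  (PySem.List.pyRange 0 (sz + 1) 1).foldl (fun acc x => pvMyrecursionFr sz x acc) []

-- ===== PORT B =====
-- the 'while True' loop of Source B: append the current triple, then advance to its successor
def pvSuccLoop (a b c : Int) (out : List (List Int)) : List (List Int) :=
  let out' := out ++ [[a, b, c]]
  if c > 0 then pvSuccLoop a (b + 1) (c - 1) out'
  else if a > 0 then pvSuccLoop (a - 1) 0 (b + c + 1) out'
  else out'
termination_by (a.toNat, c.toNat)
decreasing_by
  · exact Prod.Lex.right _ (by omega)
  · exact Prod.Lex.left _ _ (by omega)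


def compose_gen_sz_alt (sz : Int) : List (List Int) :=
  if sz < 0 then [] else pvSuccLoop sz 0 0 []

-- ===== PRECONDITION & SPEC =====
def Spec_compose_gen_sz (sz : Int) (out : List (List Int)) : Prop := out = compose_gen_sz_alt sz
instance (sz : Int) (out : List (List Int)) : Decidable (Spec_compose_gen_sz sz out) := by unfold Spec_compose_gen_sz; infer_instance

-- ===== CLAIM (what is proved, stated in full; the proofs are below) =====
def Claim_equal_compose_gen_sz : Prop := ∀ (sz : Int), Dom_compose_gen_sz sz → Spec_compose_gen_sz sz (compose_gen_sz sz)

-- ===== LEMMAS AND PROOFS =====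

def pvRow (s a : Int) : List (List Int) :=
  (PySem.List.pyRange 0 (s - a + 1) 1).map (fun k => [a, k, s - a - k])

def pvRowsN (s : Int) : Nat → List (List Int)
  | 0 => pvRow s 0
  | n + 1 => pvRow s (n + 1) ++ pvRowsN s n

def pvRows (s a : Int) : List (List Int) :=
  if a < 0 then [] else pvRowsN s a.toNat

theorem pvRowsN_eq (s : Int) (n : Nat) :
    pvRowsN s n = (PySem.List.pyRange (s - n) (s + 1) 1).flatMap
      (fun x => (PySem.List.pyRange 0 (x + 1) 1).map (fun k => [s - x, k, x - k])) := by
  induction n with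
  | zero =>
    rw [pvRowsN, show s - (0:Nat) = s from by push_cast; ring,
      PySem.List.pyRange_one_singleton s]
    simp [pvRow]
  | succ n ih =>
    rw [pvRowsN, ih, show s - ((n + 1 : Nat) : Int) = s - n - 1 from by push_cast; ring,
      PySem.List.pyRange_one_cons (a := s - n - 1) (b := s + 1) (by omega), List.flatMap_cons,
      show s - n - 1 + 1 = s - n from by ring]
    congr 1
    unfold pvRow
    rw [show s - (s - (n:Int) - 1) = (n : Int) + 1 from by ring,
      show s - ((n:Int) + 1) + 1 = s - (n:Int) from by ring]
    congr 1
    funext k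
    rw [show s - ((n:Int) + 1) - k = s - (n:Int) - 1 - k from by ring]

theorem pvRows_eq (s a : Int) :
    pvRows s a = (PySem.List.pyRange (s - a) (s + 1) 1).flatMap
      (fun x => (PySem.List.pyRange 0 (x + 1) 1).map (fun k => [s - x, k, x - k])) := by
  unfold pvRows
  split_ifs with h
  · rw [PySem.List.pyRange_one_eq_nil (by omega)]; simp
  · rw [pvRowsN_eq, show ((a.toNat : Int)) = a from by omega]

theorem pvRows_unfold (s a : Int) (h : 0 ≤ a) :
    pvRows s a = pvRow s a ++ pvRows s (a - 1) := by
  unfold pvRows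
  rcases Int.eq_ofNat_of_zero_le h with ⟨n, rfl⟩
  cases n with
  | zero => simp [pvRowsN, pvRow]
  | succ m =>
    rw [if_neg (by omega), if_neg (by omega),
      show ((m + 1 : Nat) : Int).toNat = m + 1 from by omega,
      show (((m + 1 : Nat) : Int) - 1).toNat = m from by omega]
    rw [pvRowsN]
    push_cast
    rfl

theorem pvSuccLoop_eq (a b c : Int) (out : List (List Int)) :
    0 ≤ a → 0 ≤ b → 0 ≤ c →
    pvSuccLoop a b c out =
      out ++ ((PySem.List.pyRange b (b + c + 1) 1).map (fun k => [a, k, b + c - k]))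
          ++ pvRows (a + b + c) (a - 1) := by
  induction a, b, c, out using pvSuccLoop.induct with
  | case1 a b c out out' hc ih =>
    intro ha hb _
    rw [pvSuccLoop]; simp only [if_pos hc]
    rw [ih ha (by omega) (by omega)]
    rw [PySem.List.pyRange_one_cons (a := b) (b := b + c + 1) (by omega)]
    have e1 : b + 1 + (c - 1) + 1 = b + c + 1 := by ring
    have e2 : a + (b + 1) + (c - 1) = a + b + c := by ring
    have e3 : ∀ k : Int, b + 1 + (c - 1) - k = b + c - k := fun k => by ring
    simp only [e1, e2, e3]
    rw [List.map_cons, show b + c - b = c from by ring]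
    show out ++ [[a, b, c]] ++ _ ++ _ = _
    simp [List.append_assoc]
  | case2 a b c out out' hc ha ih =>
    intro _ hb hc0
    have hc' : c = 0 := by omega
    subst hc'
    rw [pvSuccLoop]; simp only [if_neg hc, if_pos ha]  -- branch 2
    rw [ih (by omega) (by omega) (by omega)]
    rw [pvRows_unfold (a + b + 0) (a - 1) (by omega)]
    rw [show PySem.List.pyRange b (b + 0 + 1) 1 = [b] from by
      rw [show b + 0 + 1 = b + 1 from by ring]; exact PySem.List.pyRange_one_singleton b]
    have e1 : a - 1 + 0 + (b + 0 + 1) = a + b + 0 := by ring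
    have e2 : a - 1 - 1 = a - 1 - 1 := rfl
    rw [e1]
    unfold pvRow
    have e3 : ∀ k : Int, (0:Int) + (b + 0 + 1) - k = (a + b + 0) - (a - 1) - k := fun k => by ring
    have e4 : (0:Int) + (b + 0 + 1) + 1 = (a + b + 0) - (a - 1) + 1 := by ring
    simp only [e3, e4]
    rw [List.map_cons, show b + 0 - b = (0:Int) from by ring]
    show out ++ [[a, b, 0]] ++ _ ++ _ = _
    simp [List.append_assoc]
  | case3 a b c out hc ha =>
    intro ha0 hb hc0
    have h1 : a = 0 := by omega
    have h2 : c = 0 := by omega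
    subst h1; subst h2
    rw [pvSuccLoop]; simp only [if_neg hc]
    rw [show pvRows (0 + b + 0) (0 - 1) = [] from by unfold pvRows; rw [if_pos (by omega)]]
    rw [show PySem.List.pyRange b (b + 0 + 1) 1 = [b] from by
      rw [show b + 0 + 1 = b + 1 from by ring]; exact PySem.List.pyRange_one_singleton b]
    simp

theorem pvMyrecursionFr_eq (sz fr : Int) (acc : List (List Int)) :
    pvMyrecursionFr sz fr acc
      = acc ++ (PySem.List.pyRange 0 (fr + 1) 1).map (fun k => [sz - fr, k, fr - k]) := by
  unfold pvMyrecursionFr pvMyrecursionBoth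
  exact PySem.List.foldl_append_singleton_eq_map _ _ _

theorem compose_gen_sz_eq_flatMap (sz : Int) :
    compose_gen_sz sz = (PySem.List.pyRange 0 (sz + 1) 1).flatMap
      (fun x => (PySem.List.pyRange 0 (x + 1) 1).map (fun k => [sz - x, k, x - k])) := by
  unfold compose_gen_sz
  rw [show (fun acc x => pvMyrecursionFr sz x acc)
        = (fun acc x => acc ++ (PySem.List.pyRange 0 (x + 1) 1).map (fun k => [sz - x, k, x - k]))
      from funext fun acc => funext fun x => pvMyrecursionFr_eq sz x acc]
  rw [PySem.List.foldl_append_eq_flatMap]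
  simp

-- ===== VERDICT (by name: the statement is the Claim_ definition above) =====
theorem compose_gen_sz_spec : Claim_equal_compose_gen_sz := by
  intro sz _
  unfold Spec_compose_gen_sz compose_gen_sz_alt
  rw [compose_gen_sz_eq_flatMap]
  by_cases hneg : sz < 0
  · rw [if_pos hneg, PySem.List.pyRange_one_eq_nil (by omega)]
    simp
  · rw [if_neg hneg, pvSuccLoop_eq sz 0 0 [] (by omega) le_rfl le_rfl]
    rw [show PySem.List.pyRange 0 (0 + 0 + 1) 1 = [0] from by
      rw [show (0:Int) + 0 + 1 = 0 + 1 from by ring]; exact PySem.List.pyRange_one_singleton 0]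
    rw [show sz + 0 + 0 = sz from by ring]
    have hrow : pvRow sz sz = [[sz, 0, 0]] := by
      unfold pvRow
      rw [show sz - sz + 1 = (0:Int) + 1 from by ring, PySem.List.pyRange_one_singleton 0]
      simp
    rw [show ([] : List (List Int)) ++ List.map (fun k => [sz, k, 0 + 0 - k]) [0]
          ++ pvRows sz (sz - 1) = pvRows sz sz from by
      rw [pvRows_unfold sz sz (by omega), hrow]; simp]
    rw [pvRows_eq, show sz - sz = (0:Int) from by ring]
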